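-- pv_equiv track=rewrite | github.com/reussered/p32-animatronic-bot | tools/esp32_pin_assigner.py | create_bus_arrays
-- ===== SOURCE A (Python) =====
-- from typing import Dict, List, Set, Any
--
-- def create_bus_arrays(bus_types: Dict[str, Set[int]]) -> Dict[str, List[int]]:
--     """Create ordered arrays for each bus type with multi-assignable pins at the end"""
--     arrays = {}
--
--     for bus_type, pins in bus_types.items():
--         # Convert to sorted list
--         pin_list = sorted(list(pins))
--
--         # For pins that can be used in multiple buses, put them at the end
--         # This requires analyzing which pins appear in multiple bus types
--         multi_assignable = set()
--         single_assignable = set()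
--
--         for pin in pin_list:
--             # Count how many bus types this pin can be used for
--             count = sum(1 for bus_pins in bus_types.values() if pin in bus_pins)
--             if count > 1:
--                 multi_assignable.add(pin)
--             else:
--                 single_assignable.add(pin)
--
--         # Create ordered array: single-purpose pins first, then multi-purpose
--         ordered_pins = sorted(list(single_assignable)) + sorted(list(multi_assignable))
--         arrays[f"{bus_type}_assignable"] = ordered_pins
--
--     return arrays
-- ===== SOURCE B (Python) =====
-- def create_bus_arrays(bus_types):
--     """Create ordered arrays for each bus type with multi-assignable pins at the end"""
--     # One global pass: count in how many buses each pin occurs, then build the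
--     # globally-sorted singles/multis lists once and filter them per bus.
--     all_pins = [pin for pins in bus_types.values() for pin in pins]
--     counter = {}
--     for pin in all_pins:
--         counter[pin] = counter.get(pin, 0) + 1
--     singles = sorted(pin for pin in counter if counter[pin] == 1)
--     multis = sorted(pin for pin in counter if counter[pin] > 1)
--     return {f"{bus_type}_assignable":
--                 [pin for pin in singles if pin in pins] +
--                 [pin for pin in multis if pin in pins]
--             for bus_type, pins in bus_types.items()}
-- ===== Notes on version B (the rewrite author's own statement) =====
-- stated objective: faster
-- what changed: Instead of A's per-bus rescan of every bus for every pin plus per-bus set-classify-and-double-sort, B makes one global pass building a pin->count table, sorts the global singles and multis lists once, and produces each bus's array by filtering those two sorted lists.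
import Mathlib
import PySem

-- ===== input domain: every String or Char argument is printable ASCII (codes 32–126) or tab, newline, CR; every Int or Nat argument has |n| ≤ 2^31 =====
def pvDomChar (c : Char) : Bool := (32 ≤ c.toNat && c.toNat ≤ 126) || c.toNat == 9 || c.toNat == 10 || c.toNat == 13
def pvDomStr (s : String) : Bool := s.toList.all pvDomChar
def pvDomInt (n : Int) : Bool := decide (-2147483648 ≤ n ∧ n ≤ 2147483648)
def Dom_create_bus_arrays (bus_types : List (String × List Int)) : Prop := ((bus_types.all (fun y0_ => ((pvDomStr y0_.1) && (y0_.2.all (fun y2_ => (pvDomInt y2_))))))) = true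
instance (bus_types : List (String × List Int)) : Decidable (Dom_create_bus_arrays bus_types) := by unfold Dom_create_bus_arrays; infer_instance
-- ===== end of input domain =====

-- B replaces A's per-bus rescan of all buses by one global pin counter and two
-- globally sorted pin lists filtered per bus (objective: faster).
-- A's input is a dict of sets; insertion-order/return-value equivalence only (no mutation).

-- ===== PORT A =====
def create_bus_arrays (bus_types : List (String × List Int)) : List (String × List Int) :=
  (bus_types.foldl (fun arrays bt =>
      let pin_list := PySem.List.sorted bt.2 (fun x => x) false
      let sm :=
        pin_list.foldl (fun (sm : PySem.Set Int × PySem.Set Int) pin =>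
            let count : Int := (bus_types.map (fun b => if pin ∈ b.2 then (1 : Int) else 0)).sum
            if count > 1 then (PySem.Set.add sm.1 pin, sm.2) else (sm.1, PySem.Set.add sm.2 pin))
          (PySem.Set.empty, PySem.Set.empty)
      let ordered :=
        PySem.List.sorted sm.2 (fun x => x) false ++ PySem.List.sorted sm.1 (fun x => x) false
      arrays.insert (bt.1 ++ "_assignable") ordered)
    PySem.Dict.empty).items

-- ===== PORT B =====
def create_bus_arrays_alt (bus_types : List (String × List Int)) : List (String × List Int) :=
  let all_pins := bus_types.flatMap (fun bt => bt.2)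
  let counter := all_pins.foldl (fun (d : PySem.Dict Int Int) pin => d.insert pin (d.getD pin 0 + 1)) PySem.Dict.empty
  let singles := PySem.List.sorted (counter.keys.filter (fun pin => counter.getD pin 0 == 1)) (fun x => x) false
  let multis := PySem.List.sorted (counter.keys.filter (fun pin => counter.getD pin 0 > 1)) (fun x => x) false
  bus_types.map (fun bt =>
    (bt.1 ++ "_assignable",
     singles.filter (fun pin => pin ∈ bt.2) ++ multis.filter (fun pin => pin ∈ bt.2)))

-- ===== PRECONDITION & SPEC =====
-- Pre_ excludes association lists with duplicate bus names or duplicate pins inside one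
-- bus: the Python argument is a dict of sets, so such lists do not represent any input
-- A ever receives (duplicates collapse before A runs).
def Pre_create_bus_arrays (bus_types : List (String × List Int)) : Prop :=
  (bus_types.map Prod.fst).Nodup ∧ ∀ bt ∈ bus_types, bt.2.Nodup
instance (bus_types : List (String × List Int)) : Decidable (Pre_create_bus_arrays bus_types) := by
  unfold Pre_create_bus_arrays; infer_instance

def pvWitness_create_bus_arrays : (List (String × List Int)) :=
  [("i2c", [4, 5, 18]), ("spi", [18, 19]), ("uart", [])]

def Spec_create_bus_arrays (bus_types : List (String × List Int)) (out : List (String × List Int)) : Prop := out = create_bus_arrays_alt bus_types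
instance (bus_types : List (String × List Int)) (out : List (String × List Int)) : Decidable (Spec_create_bus_arrays bus_types out) := by unfold Spec_create_bus_arrays; infer_instance

-- ===== CLAIM (what is proved, stated in full; the proofs are below) =====
def Claim_equal_create_bus_arrays : Prop := ∀ (bus_types : List (String × List Int)), Dom_create_bus_arrays bus_types → Pre_create_bus_arrays bus_types → Spec_create_bus_arrays bus_types (create_bus_arrays bus_types)

-- ===== LEMMAS AND PROOFS =====

-- strictly increasing lists are determined by their members
lemma strict_eq_of_mem_iff (l₁ l₂ : List Int)
    (h₁ : l₁.Pairwise (· < ·)) (h₂ : l₂.Pairwise (· < ·))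
    (hm : ∀ x, x ∈ l₁ ↔ x ∈ l₂) : l₁ = l₂ := by
  have n₁ : l₁.Nodup := h₁.imp ne_of_lt
  have n₂ : l₂.Nodup := h₂.imp ne_of_lt
  exact List.Perm.eq_of_pairwise (fun a b _ _ hab hba => le_antisymm (le_of_lt hab) (le_of_lt hba)) h₁ h₂ ((List.perm_ext_iff_of_nodup n₁ n₂).mpr hm)

lemma pairwise_lt_of_le_nodup (l : List Int)
    (h₁ : l.Pairwise (· ≤ ·)) (h₂ : l.Nodup) : l.Pairwise (· < ·) :=
  (h₁.and h₂).imp (fun h => lt_of_le_of_ne h.1 h.2)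

-- A's classification loop over distinct pins splits the list by the test
lemma foldA_split (f : Int → Int) : ∀ (pl : List Int) (m s : PySem.Set Int), pl.Nodup →
    (∀ p ∈ pl, p ∉ m) → (∀ p ∈ pl, p ∉ s) →
    pl.foldl (fun (sm : PySem.Set Int × PySem.Set Int) pin =>
        if f pin > 1 then (PySem.Set.add sm.1 pin, sm.2) else (sm.1, PySem.Set.add sm.2 pin)) (m, s)
      = (m ++ pl.filter (fun p => f p > 1), s ++ pl.filter (fun p => ¬ f p > 1)) := by
  intro pl
  induction pl with
  | nil => intro m s _ _ _; simp
  | cons pin rest ih =>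
    intro m s hn hm hs
    have hpm : pin ∉ m := hm pin (by simp)
    have hps : pin ∉ s := hs pin (by simp)
    have hnr : rest.Nodup := (List.nodup_cons.mp hn).2
    have hpr : pin ∉ rest := (List.nodup_cons.mp hn).1
    simp only [List.foldl_cons, List.filter_cons]
    by_cases hf : f pin > 1
    · rw [if_pos hf, PySem.Set.add_of_not_mem hpm,
        ih (m ++ [pin]) s hnr
          (fun p hp => by
            simp only [List.mem_append, List.mem_singleton]
            rintro (h | rfl)
            · exact hm p (List.mem_cons_of_mem _ hp) h
            · exact hpr hp)
          (fun p hp => hs p (List.mem_cons_of_mem _ hp))]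
      simp [hf]
    · rw [if_neg hf, PySem.Set.add_of_not_mem hps,
        ih m (s ++ [pin]) hnr
          (fun p hp => hm p (List.mem_cons_of_mem _ hp))
          (fun p hp => by
            simp only [List.mem_append, List.mem_singleton]
            rintro (h | rfl)
            · exact hs p (List.mem_cons_of_mem _ hp) h
            · exact hpr hp)]
      simp [hf]

-- count of a pin in the concatenation = A's per-bus 0/1 sum (sets are duplicate-free)
lemma count_flatMap_eq_sum (l : List (String × List Int)) (hn : ∀ bt ∈ l, bt.2.Nodup) (p : Int) :
    ((l.flatMap (fun bt => bt.2)).count p : Int)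
      = (l.map (fun b => if p ∈ b.2 then (1 : Int) else 0)).sum := by
  induction l with
  | nil => simp
  | cons bt rest ih =>
    have hbt : bt.2.Nodup := hn bt (by simp)
    have ih' := ih (fun b hb => hn b (List.mem_cons_of_mem _ hb))
    simp only [List.flatMap_cons, List.map_cons, List.sum_cons, List.count_append]
    rw [← ih']
    push_cast
    by_cases hp : p ∈ bt.2
    · rw [if_pos hp, List.count_eq_one_of_mem hbt hp]
      norm_num
    · rw [if_neg hp, List.count_eq_zero_of_not_mem hp]
      simp

-- the per-bus ordered array computed by A equals B's filtered global lists
lemma bucket_eq (bus_types : List (String × List Int)) (hn : ∀ bt ∈ bus_types, bt.2.Nodup)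
    (bt : String × List Int) (hbt : bt ∈ bus_types) :
    (PySem.List.sorted
        ((PySem.List.sorted bt.2 (fun x => x) false).foldl (fun (sm : PySem.Set Int × PySem.Set Int) pin =>
            if ((bus_types.map (fun b => if pin ∈ b.2 then (1 : Int) else 0)).sum) > 1
            then (PySem.Set.add sm.1 pin, sm.2) else (sm.1, PySem.Set.add sm.2 pin))
          (PySem.Set.empty, PySem.Set.empty)).2 (fun x => x) false ++
     PySem.List.sorted
        ((PySem.List.sorted bt.2 (fun x => x) false).foldl (fun (sm : PySem.Set Int × PySem.Set Int) pin =>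
            if ((bus_types.map (fun b => if pin ∈ b.2 then (1 : Int) else 0)).sum) > 1
            then (PySem.Set.add sm.1 pin, sm.2) else (sm.1, PySem.Set.add sm.2 pin))
          (PySem.Set.empty, PySem.Set.empty)).1 (fun x => x) false)
    = (PySem.List.sorted (((PySem.Dict.counter (bus_types.flatMap (fun bt => bt.2)) : PySem.Dict Int Int)).keys.filter
          (fun pin => (PySem.Dict.counter (bus_types.flatMap (fun bt => bt.2))).getD pin 0 == 1)) (fun x => x) false).filter
        (fun pin => pin ∈ bt.2) ++
      (PySem.List.sorted ((PySem.Dict.counter (bus_types.flatMap (fun bt => bt.2))).keys.filter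
          (fun pin => (PySem.Dict.counter (bus_types.flatMap (fun bt => bt.2))).getD pin 0 > 1)) (fun x => x) false).filter
        (fun pin => pin ∈ bt.2) := by
  have hS : bt.2.Nodup := hn bt hbt
  set all_pins := bus_types.flatMap (fun bt => bt.2) with hap
  set pl := PySem.List.sorted bt.2 (fun x => x) false with hpl
  have hplperm : pl.Perm bt.2 := PySem.List.sorted_perm bt.2 (fun x => x) false
  have npl : pl.Nodup := hplperm.symm.nodup hS
  have ple : pl.Pairwise (· ≤ ·) := by
    have := PySem.List.sorted_pairwise bt.2 (fun x => x); simpa using this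
  have plt : pl.Pairwise (· < ·) := pairwise_lt_of_le_nodup pl ple npl
  have hcount : ∀ x : Int, (PySem.Dict.counter all_pins : PySem.Dict Int Int).getD x 0
      = (all_pins.count x : Int) := fun x => PySem.Dict.getD_counter all_pins x
  have hkeys : (PySem.Dict.counter all_pins : PySem.Dict Int Int).keys = PySem.Set.ofList all_pins :=
    PySem.Dict.keys_counter all_pins
  have hkn : ((PySem.Dict.counter all_pins : PySem.Dict Int Int)).keys.Nodup :=
    PySem.Dict.nodup_keys_counter all_pins
  have hxS_mem : ∀ x ∈ bt.2, x ∈ all_pins := fun x hx => List.mem_flatMap.mpr ⟨bt, hbt, hx⟩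
  have hf : ∀ x : Int, (bus_types.map (fun b => if x ∈ b.2 then (1 : Int) else 0)).sum
      = (all_pins.count x : Int) := fun x => (count_flatMap_eq_sum bus_types hn x).symm
  rw [foldA_split (fun pin => (bus_types.map (fun b => if pin ∈ b.2 then (1 : Int) else 0)).sum)
        pl PySem.Set.empty PySem.Set.empty npl (by simp [PySem.Set.empty]) (by simp [PySem.Set.empty])]
  simp only [PySem.Set.empty, List.nil_append]
  rw [PySem.List.sorted_eq_self_of_pairwise
        (xs := pl.filter (fun p => decide (¬(List.map (fun b => if p ∈ b.2 then (1 : Int) else 0) bus_types).sum > 1)))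
        (key := fun x => x) (by simpa using (plt.filter _).imp (le_of_lt (α := Int))),
      PySem.List.sorted_eq_self_of_pairwise
        (xs := pl.filter (fun p => decide ((List.map (fun b => if p ∈ b.2 then (1 : Int) else 0) bus_types).sum > 1)))
        (key := fun x => x) (by simpa using (plt.filter _).imp (le_of_lt (α := Int)))]
  congr 1
  · apply strict_eq_of_mem_iff
    · exact plt.filter _
    · refine List.Pairwise.filter _ (pairwise_lt_of_le_nodup _ ?_ ?_)
      · have := PySem.List.sorted_pairwise
          (((PySem.Dict.counter all_pins : PySem.Dict Int Int)).keys.filter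
            (fun pin => (PySem.Dict.counter all_pins).getD pin 0 == 1)) (fun x => x)
        simpa using this
      · exact (PySem.List.sorted_perm _ (fun x => x) false).symm.nodup (hkn.filter _)
    · intro x
      simp only [List.mem_filter, PySem.List.mem_sorted, hpl, hkeys, PySem.Set.mem_ofList,
        hcount, decide_eq_true_eq, beq_iff_eq]
      constructor
      · rintro ⟨hxS, hcond⟩
        have hxa : x ∈ all_pins := hxS_mem x hxS
        have hc1 : 0 < all_pins.count x := List.count_pos_iff.mpr hxa
        rw [hf x] at hcond
        exact ⟨⟨hxa, by omega⟩, hxS⟩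
      · rintro ⟨⟨hxa, hc⟩, hxS⟩
        refine ⟨hxS, ?_⟩
        rw [hf x]
        omega
  · apply strict_eq_of_mem_iff
    · exact plt.filter _
    · refine List.Pairwise.filter _ (pairwise_lt_of_le_nodup _ ?_ ?_)
      · have := PySem.List.sorted_pairwise
          (((PySem.Dict.counter all_pins : PySem.Dict Int Int)).keys.filter
            (fun pin => decide ((PySem.Dict.counter all_pins).getD pin 0 > 1))) (fun x => x)
        simpa using this
      · exact (PySem.List.sorted_perm _ (fun x => x) false).symm.nodup (hkn.filter _)
    · intro x
      simp only [List.mem_filter, PySem.List.mem_sorted, hpl, hkeys, PySem.Set.mem_ofList,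
        hcount, decide_eq_true_eq]
      constructor
      · rintro ⟨hxS, hcond⟩
        have hxa : x ∈ all_pins := hxS_mem x hxS
        rw [hf x] at hcond
        exact ⟨⟨hxa, hcond⟩, hxS⟩
      · rintro ⟨⟨hxa, hc⟩, hxS⟩
        refine ⟨hxS, ?_⟩
        rw [hf x]
        exact hc

-- ===== VERDICT (by name: the statement is the Claim_ definition above) =====
theorem create_bus_arrays_spec : Claim_equal_create_bus_arrays := by
  intro bus_types hdom hpre
  unfold Spec_create_bus_arrays create_bus_arrays create_bus_arrays_alt
  have hinj : Function.Injective (fun s : String => s ++ "_assignable") :=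
    fun a b h => (String.append_left_inj "_assignable").mp h
  have hkeysn : (bus_types.map (fun bt : String × List Int => bt.1 ++ "_assignable")).Nodup := by
    have := hpre.1.map hinj
    simpa [List.map_map, Function.comp] using this
  have hA := PySem.Dict.items_foldl_insert_fresh
      (l := bus_types) (d := PySem.Dict.empty)
      (k := fun bt : String × List Int => bt.1 ++ "_assignable")
      (v := fun bt : String × List Int =>
        PySem.List.sorted
          ((PySem.List.sorted bt.2 (fun x => x) false).foldl (fun (sm : PySem.Set Int × PySem.Set Int) pin =>
              if ((bus_types.map (fun b => if pin ∈ b.2 then (1 : Int) else 0)).sum) > 1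
              then (PySem.Set.add sm.1 pin, sm.2) else (sm.1, PySem.Set.add sm.2 pin))
            (PySem.Set.empty, PySem.Set.empty)).2 (fun x => x) false ++
        PySem.List.sorted
          ((PySem.List.sorted bt.2 (fun x => x) false).foldl (fun (sm : PySem.Set Int × PySem.Set Int) pin =>
              if ((bus_types.map (fun b => if pin ∈ b.2 then (1 : Int) else 0)).sum) > 1
              then (PySem.Set.add sm.1 pin, sm.2) else (sm.1, PySem.Set.add sm.2 pin))
            (PySem.Set.empty, PySem.Set.empty)).1 (fun x => x) false)
      (by intro a _; simp) hkeysn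
  refine Eq.trans (by simpa using hA) (List.map_congr_left ?_)
  intro bt hbt
  exact congrArg (fun v => (bt.1 ++ "_assignable", v)) (bucket_eq bus_types hpre.2 bt hbt)
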